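-- pv_equiv track=rewrite | github.com/danielmarinhom/obi | spoj/pedagio.py | bfs
-- ===== SOURCE A (Python) =====
-- def bfs(conexoes, atual, maximo):
--   queue = [(atual,0)]
--   visited = set([atual])
--   while queue:
--     novo, distancia = queue.pop(0)
--     if distancia < maximo:
--       for x,y in conexoes:
--         if x == novo and y not in visited:
--           queue.append((y,distancia+1))
--           visited.add(y)
--         elif y == novo and x not in visited:
--           queue.append((x,distancia+1))
--           visited.add(x)
--   return sorted(visited - {atual})
-- ===== SOURCE B (Python) =====
-- def bfs(conexoes, atual, maximo):
--   # Level-synchronous BFS: build an adjacency dict once, then expand whole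
--   # frontiers level by level (no queue of (node, distance) pairs, no rescan
--   # of the connection list per node).
--   adj = {}
--   for x, y in conexoes:
--     adj.setdefault(x, []).append(y)
--     if y != x:
--       adj.setdefault(y, []).append(x)
--   visited = {atual}
--   frontier = [atual]
--   d = 0
--   while frontier and d < maximo:
--     nxt = []
--     for novo in frontier:
--       for viz in adj.get(novo, ()):
--         if viz not in visited:
--           visited.add(viz)
--           nxt.append(viz)
--     frontier = nxt
--     d += 1
--   return sorted(visited - {atual})
-- ===== Notes on version B (the rewrite author's own statement) =====
-- stated objective: alternative
-- what changed: B precomputes an adjacency dict and runs a level-synchronous BFS (expand the whole frontier each round, no queue of (node,distance) pairs), instead of A's FIFO queue that rescans the entire connection list at every dequeued node; asymptotically better per dequeued node, but not claimed measurably faster on the timed inputs.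
import Mathlib
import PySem

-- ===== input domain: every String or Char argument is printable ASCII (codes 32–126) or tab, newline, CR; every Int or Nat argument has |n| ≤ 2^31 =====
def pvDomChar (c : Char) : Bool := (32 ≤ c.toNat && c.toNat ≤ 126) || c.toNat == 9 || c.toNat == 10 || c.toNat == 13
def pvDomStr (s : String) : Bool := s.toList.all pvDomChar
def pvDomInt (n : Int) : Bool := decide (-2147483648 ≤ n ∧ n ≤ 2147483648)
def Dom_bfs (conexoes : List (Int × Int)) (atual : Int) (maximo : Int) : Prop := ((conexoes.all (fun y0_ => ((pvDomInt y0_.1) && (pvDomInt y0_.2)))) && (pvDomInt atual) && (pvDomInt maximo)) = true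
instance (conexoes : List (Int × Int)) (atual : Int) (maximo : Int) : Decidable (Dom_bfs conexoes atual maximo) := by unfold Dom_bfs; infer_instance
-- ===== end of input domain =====

-- B builds an adjacency dict once and runs a LEVEL-SYNCHRONOUS BFS (expand the
-- whole frontier each round, no queue of (node,distance) pairs), instead of A's
-- FIFO queue that rescans the whole connection list at every dequeued node.

-- ===== PORT A =====
-- A's inner 'for x,y in conexoes' body: appends to the queue and marks visited.
def bfsStepA (novo : Int) (distancia : Int)
    (st : List (Int × Int) × PySem.Set Int) (e : Int × Int) :
    List (Int × Int) × PySem.Set Int :=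
  if e.1 == novo && !(PySem.Set.contains st.2 e.2) then
    (st.1 ++ [(e.2, distancia + 1)], PySem.Set.add st.2 e.2)
  else if e.2 == novo && !(PySem.Set.contains st.2 e.1) then
    (st.1 ++ [(e.1, distancia + 1)], PySem.Set.add st.2 e.1)
  else st

-- A's 'while queue' loop; the fuel only makes it total (2*|conexoes|+1 pops
-- always suffice: each enqueue adds a fresh visited endpoint).
def bfsLoopA (conexoes : List (Int × Int)) (maximo : Int) :
    Nat → List (Int × Int) → PySem.Set Int → PySem.Set Int
  | 0, _, visited => visited
  | _ + 1, [], visited => visited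
  | fuel + 1, (novo, distancia) :: rest, visited =>
    if distancia < maximo then
      let st := conexoes.foldl (bfsStepA novo distancia) (rest, visited)
      bfsLoopA conexoes maximo fuel st.1 st.2
    else
      bfsLoopA conexoes maximo fuel rest visited

def bfs (conexoes : List (Int × Int)) (atual : Int) (maximo : Int) : List Int :=
  let visited := bfsLoopA conexoes maximo (2 * conexoes.length + 1)
      [(atual, 0)] (PySem.Set.ofList [atual])
  PySem.List.sorted (PySem.Set.diff visited [atual]) (fun x => x) false

-- ===== PORT B =====
-- adjacency dict: adj.setdefault(x,[]).append(y); if y != x: adj.setdefault(y,[]).append(x)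
def bfsAdj (conexoes : List (Int × Int)) : PySem.Dict Int (List Int) :=
  conexoes.foldl (fun d e =>
    let d1 := d.insert e.1 (d.getD e.1 [] ++ [e.2])
    if e.2 ≠ e.1 then d1.insert e.2 (d1.getD e.2 [] ++ [e.1]) else d1)
    PySem.Dict.empty

-- innermost 'for viz in adj.get(novo, ())' body: mark viz and put it on nxt
def expandStep (st : List Int × PySem.Set Int) (viz : Int) :
    List Int × PySem.Set Int :=
  if !(PySem.Set.contains st.2 viz) then (st.1 ++ [viz], PySem.Set.add st.2 viz)
  else st

-- 'for novo in frontier' body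
def expandNode (adj : PySem.Dict Int (List Int))
    (st : List Int × PySem.Set Int) (novo : Int) : List Int × PySem.Set Int :=
  (adj.getD novo []).foldl expandStep st

-- B's 'while frontier and d < maximo' level loop; the fuel only makes it total
-- (each round with a nonempty next frontier adds a fresh visited endpoint, so
-- 2*|conexoes|+1 rounds always suffice).
def levelLoopB (adj : PySem.Dict Int (List Int)) (maximo : Int) :
    Nat → Int → List Int → PySem.Set Int → PySem.Set Int
  | 0, _, _, visited => visited
  | fuel + 1, d, frontier, visited =>
    if frontier = [] then visited
    else if d < maximo then
      let st := frontier.foldl (expandNode adj) ([], visited)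
      levelLoopB adj maximo fuel (d + 1) st.1 st.2
    else visited

def bfs_alt (conexoes : List (Int × Int)) (atual : Int) (maximo : Int) : List Int :=
  let adj := bfsAdj conexoes
  let visited := levelLoopB adj maximo (2 * conexoes.length + 1) 0 [atual]
      (PySem.Set.ofList [atual])
  PySem.List.sorted (PySem.Set.diff visited [atual]) (fun x => x) false

-- ===== PRECONDITION & SPEC =====
def Spec_bfs (conexoes : List (Int × Int)) (atual : Int) (maximo : Int) (out : List Int) : Prop := out = bfs_alt conexoes atual maximo
instance (conexoes : List (Int × Int)) (atual : Int) (maximo : Int) (out : List Int) : Decidable (Spec_bfs conexoes atual maximo out) := by unfold Spec_bfs; infer_instance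

-- ===== CLAIM (what is proved, stated in full; the proofs are below) =====
def Claim_equal_bfs : Prop := ∀ (conexoes : List (Int × Int)) (atual : Int) (maximo : Int), Dom_bfs conexoes atual maximo → Spec_bfs conexoes atual maximo (bfs conexoes atual maximo)

-- ===== LEMMAS AND PROOFS =====

-- the neighbours of `novo` that A's inner scan would touch, in scan order
def nbrs (conexoes : List (Int × Int)) (novo : Int) : List Int :=
  conexoes.flatMap (fun e =>
    if e.1 == novo then [e.2] else if e.2 == novo then [e.1] else [])

-- all endpoints of the connection list
def ends (conexoes : List (Int × Int)) : List Int :=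
  conexoes.flatMap (fun e => [e.1, e.2])

-- unvisited endpoints: the termination measure of both loops
def nu (conexoes : List (Int × Int)) (vis : PySem.Set Int) : Nat :=
  ((ends conexoes).filter (fun z => decide (z ∉ vis))).length

theorem getD_adjStep (d : PySem.Dict Int (List Int)) (x y k : Int) :
    ((let d1 := d.insert x (d.getD x [] ++ [y])
      if y ≠ x then d1.insert y (d1.getD y [] ++ [x]) else d1) : PySem.Dict Int (List Int)).getD k []
    = d.getD k [] ++ (if x == k then [y] else if y == k then [x] else []) := by
  by_cases hyx : y = x
  · subst hyx
    simp only [ne_eq, not_true_eq_false, if_false, PySem.Dict.getD_insert, beq_iff_eq]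
    by_cases h1 : k = y
    · subst h1; simp
    · simp [h1, Ne.symm h1]
  · simp only [ne_eq, hyx, not_false_eq_true, if_true, PySem.Dict.getD_insert, beq_iff_eq]
    by_cases h1 : k = y
    · subst h1; simp [Ne.symm hyx]
    · by_cases h2 : k = x
      · subst h2; simp [h1]
      · simp [h1, h2, Ne.symm h1, Ne.symm h2]

theorem getD_bfsAdj_foldl (l : List (Int × Int)) (d : PySem.Dict Int (List Int)) (k : Int) :
    (l.foldl (fun d e =>
      let d1 := d.insert e.1 (d.getD e.1 [] ++ [e.2])
      if e.2 ≠ e.1 then d1.insert e.2 (d1.getD e.2 [] ++ [e.1]) else d1) d).getD k []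
    = d.getD k [] ++ nbrs l k := by
  induction l generalizing d with
  | nil => simp [nbrs]
  | cons e l ih =>
    rcases e with ⟨x, y⟩
    rw [List.foldl_cons, ih]
    have h := getD_adjStep d x y k
    simp only [nbrs, List.flatMap_cons] at *
    rw [h, List.append_assoc]

theorem getD_bfsAdj (conexoes : List (Int × Int)) (k : Int) :
    (bfsAdj conexoes).getD k [] = nbrs conexoes k := by
  unfold bfsAdj
  rw [getD_bfsAdj_foldl]
  simp [PySem.Dict.getD_empty]

theorem nbrs_subset_ends (conexoes : List (Int × Int)) (novo z : Int)
    (h : z ∈ nbrs conexoes novo) : z ∈ ends conexoes := by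
  simp only [nbrs, ends, List.mem_flatMap] at *
  obtain ⟨e, he, hz⟩ := h
  refine ⟨e, he, ?_⟩
  split_ifs at hz <;> simp_all

theorem ends_length (conexoes : List (Int × Int)) :
    (ends conexoes).length = 2 * conexoes.length := by
  induction conexoes with
  | nil => rfl
  | cons e l ih => simp [ends] at *; omega

-- A's inner scan over conexoes = expandStep over nbrs, with the queue prefix untouched
theorem foldA_expand (novo d : Int) :
    ∀ (l : List (Int × Int)) (base : List (Int × Int)) (nxt : List Int) (vis : PySem.Set Int),
    novo ∈ vis →
    l.foldl (bfsStepA novo d) (base ++ nxt.map (fun z => (z, d + 1)), vis)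
    = (base ++ ((nbrs l novo).foldl expandStep (nxt, vis)).1.map (fun z => (z, d + 1)),
       ((nbrs l novo).foldl expandStep (nxt, vis)).2) := by
  intro l
  induction l with
  | nil => intro base nxt vis _; simp [nbrs]
  | cons e l ih =>
    intro base nxt vis hnovo
    rcases e with ⟨x, y⟩
    have hnb : nbrs ((x, y) :: l) novo
        = (if x == novo then [y] else if y == novo then [x] else []) ++ nbrs l novo := by
      simp [nbrs]
    rw [List.foldl_cons, hnb, List.foldl_append]
    by_cases hx : x = novo
    · by_cases hy : y ∈ vis
      · have h1 : bfsStepA novo d (base ++ nxt.map (fun z => (z, d + 1)), vis) (x, y)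
            = (base ++ nxt.map (fun z => (z, d + 1)), vis) := by
          simp [bfsStepA, hx, hy, hnovo]
        have h2 : List.foldl expandStep (nxt, vis) (if x == novo then [y] else if y == novo then [x] else [])
            = (nxt, vis) := by
          simp [hx, expandStep, hy]
        rw [h1, h2, ih _ _ _ hnovo]
      · have h1 : bfsStepA novo d (base ++ nxt.map (fun z => (z, d + 1)), vis) (x, y)
            = (base ++ (nxt ++ [y]).map (fun z => (z, d + 1)), PySem.Set.add vis y) := by
          simp [bfsStepA, hx, hy]
        have h2 : List.foldl expandStep (nxt, vis) (if x == novo then [y] else if y == novo then [x] else [])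
            = (nxt ++ [y], PySem.Set.add vis y) := by
          simp [hx, expandStep, hy]
        rw [h1, h2, ih _ _ _ (by simp [PySem.Set.mem_add, hnovo])]
    · by_cases hy : y = novo
      · by_cases hxv : x ∈ vis
        · have h1 : bfsStepA novo d (base ++ nxt.map (fun z => (z, d + 1)), vis) (x, y)
              = (base ++ nxt.map (fun z => (z, d + 1)), vis) := by
            simp [bfsStepA, hx, hy, hxv]
          have h2 : List.foldl expandStep (nxt, vis) (if x == novo then [y] else if y == novo then [x] else [])
              = (nxt, vis) := by
            simp [hx, hy, expandStep, hxv]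
          rw [h1, h2, ih _ _ _ hnovo]
        · have h1 : bfsStepA novo d (base ++ nxt.map (fun z => (z, d + 1)), vis) (x, y)
              = (base ++ (nxt ++ [x]).map (fun z => (z, d + 1)), PySem.Set.add vis x) := by
            simp [bfsStepA, hx, hy, hxv]
          have h2 : List.foldl expandStep (nxt, vis) (if x == novo then [y] else if y == novo then [x] else [])
              = (nxt ++ [x], PySem.Set.add vis x) := by
            simp [hx, hy, expandStep, hxv]
          rw [h1, h2, ih _ _ _ (by simp [PySem.Set.mem_add, hnovo])]
      · have h1 : bfsStepA novo d (base ++ nxt.map (fun z => (z, d + 1)), vis) (x, y)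
            = (base ++ nxt.map (fun z => (z, d + 1)), vis) := by
          simp [bfsStepA, hx, hy]
        have h2 : List.foldl expandStep (nxt, vis) (if x == novo then [y] else if y == novo then [x] else [])
            = (nxt, vis) := by
          simp [hx, hy]
        rw [h1, h2, ih _ _ _ hnovo]

theorem bfsLoopA_nil (c : List (Int × Int)) (m : Int) (fuel : Nat) (vis : PySem.Set Int) :
    bfsLoopA c m fuel [] vis = vis := by
  cases fuel <;> rfl

theorem levelLoopB_nil (adj : PySem.Dict Int (List Int)) (m : Int) (fuel : Nat)
    (d : Int) (vis : PySem.Set Int) : levelLoopB adj m fuel d [] vis = vis := by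
  cases fuel <;> rfl

theorem drainA (c : List (Int × Int)) (m d : Int) (hd : ¬ d < m) :
    ∀ (l : List Int) (fuel : Nat) (vis : PySem.Set Int),
    bfsLoopA c m (l.length + fuel) (l.map (fun z => (z, d))) vis = vis := by
  intro l
  induction l with
  | nil => intro fuel vis; simpa using bfsLoopA_nil c m fuel vis
  | cons z l ih =>
    intro fuel vis
    rw [show (z :: l).length + fuel = (l.length + fuel) + 1 from by simp; omega]
    simp only [List.map_cons, bfsLoopA, if_neg hd]
    exact ih fuel vis

theorem expand_fold_inv :
    ∀ (l : List Int) (nxt : List Int) (vis : PySem.Set Int),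
    ∃ t, l.foldl expandStep (nxt, vis) = (nxt ++ t, vis ++ t) ∧ t.Nodup ∧
      (∀ z ∈ t, z ∈ l ∧ z ∉ vis) := by
  intro l
  induction l with
  | nil => intro nxt vis; exact ⟨[], by simp, by simp, by simp⟩
  | cons viz l ih =>
    intro nxt vis
    by_cases h : viz ∈ vis
    · obtain ⟨t, heq, hnd, hmem⟩ := ih nxt vis
      refine ⟨t, ?_, hnd, fun z hz => ⟨List.mem_cons_of_mem _ (hmem z hz).1, (hmem z hz).2⟩⟩
      rw [List.foldl_cons]
      have : expandStep (nxt, vis) viz = (nxt, vis) := by simp [expandStep, h]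
      rw [this, heq]
    · obtain ⟨t, heq, hnd, hmem⟩ := ih (nxt ++ [viz]) (vis ++ [viz])
      refine ⟨viz :: t, ?_, ?_, ?_⟩
      · rw [List.foldl_cons]
        have : expandStep (nxt, vis) viz = (nxt ++ [viz], vis ++ [viz]) := by
          simp [expandStep, h, PySem.Set.add]
        rw [this, heq]; simp
      · refine List.nodup_cons.2 ⟨fun hc => ?_, hnd⟩
        have := (hmem viz hc).2; simp at this
      · intro z hz
        rcases List.mem_cons.1 hz with rfl | hz'
        · exact ⟨List.mem_cons_self, h⟩
        · refine ⟨List.mem_cons_of_mem _ (hmem z hz').1, fun hc => (hmem z hz').2 ?_⟩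
          simp [hc]

theorem expand_front_inv (c : List (Int × Int)) :
    ∀ (frontier : List Int) (nxt : List Int) (vis : PySem.Set Int),
    ∃ t, frontier.foldl (expandNode (bfsAdj c)) (nxt, vis) = (nxt ++ t, vis ++ t) ∧
      t.Nodup ∧ (∀ z ∈ t, z ∈ ends c ∧ z ∉ vis) := by
  intro frontier
  induction frontier with
  | nil => intro nxt vis; exact ⟨[], by simp, by simp, by simp⟩
  | cons novo f ih =>
    intro nxt vis
    obtain ⟨t1, heq1, hnd1, hm1⟩ := expand_fold_inv (nbrs c novo) nxt vis
    obtain ⟨t2, heq2, hnd2, hm2⟩ := ih (nxt ++ t1) (vis ++ t1)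
    refine ⟨t1 ++ t2, ?_, ?_, ?_⟩
    · rw [List.foldl_cons]
      have : expandNode (bfsAdj c) (nxt, vis) novo = (nxt ++ t1, vis ++ t1) := by
        unfold expandNode; rw [getD_bfsAdj]; exact heq1
      rw [this, heq2]; simp
    · refine hnd1.append hnd2 (fun z hz1 hz2 => ?_)
      have := (hm2 z hz2).2; simp at this; exact this.2 hz1
    · intro z hz
      rcases List.mem_append.1 hz with hz1 | hz2
      · exact ⟨nbrs_subset_ends c novo z (hm1 z hz1).1, (hm1 z hz1).2⟩
      · have h2 := (hm2 z hz2).2; simp at h2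
        exact ⟨(hm2 z hz2).1, h2.1⟩

theorem levelA (c : List (Int × Int)) (m d : Int) (hd : d < m) :
    ∀ (rem nxt : List Int) (vis : PySem.Set Int) (fuel : Nat),
    (∀ z ∈ rem, z ∈ vis) →
    bfsLoopA c m (rem.length + fuel)
      (rem.map (fun z => (z, d)) ++ nxt.map (fun z => (z, d + 1))) vis
    = bfsLoopA c m fuel
        ((rem.foldl (expandNode (bfsAdj c)) (nxt, vis)).1.map (fun z => (z, d + 1)))
        (rem.foldl (expandNode (bfsAdj c)) (nxt, vis)).2 := by
  intro rem
  induction rem with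
  | nil => intro nxt vis fuel _; simp
  | cons novo rem ih =>
    intro nxt vis fuel hsub
    rw [show (novo :: rem).length + fuel = (rem.length + fuel) + 1 from by simp; omega]
    simp only [List.map_cons, List.cons_append, bfsLoopA, if_pos hd]
    have hstep : c.foldl (bfsStepA novo d) (rem.map (fun z => (z, d)) ++ nxt.map (fun z => (z, d + 1)), vis)
        = (rem.map (fun z => (z, d)) ++ (expandNode (bfsAdj c) (nxt, vis) novo).1.map (fun z => (z, d + 1)),
           (expandNode (bfsAdj c) (nxt, vis) novo).2) := by
      have := foldA_expand novo d c (rem.map (fun z => (z, d))) nxt vis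
        (hsub novo List.mem_cons_self)
      rw [this]
      unfold expandNode
      rw [getD_bfsAdj]
    rw [hstep]
    obtain ⟨t, heq, -, -⟩ := expand_fold_inv (nbrs c novo) nxt vis
    have heq' : expandNode (bfsAdj c) (nxt, vis) novo = (nxt ++ t, vis ++ t) := by
      unfold expandNode; rw [getD_bfsAdj]; exact heq
    have hsub' : ∀ z ∈ rem, z ∈ (expandNode (bfsAdj c) (nxt, vis) novo).2 := by
      intro z hz
      rw [heq']
      exact List.mem_append_left _ (hsub z (List.mem_cons_of_mem _ hz))
    rw [List.foldl_cons]
    exact ih (expandNode (bfsAdj c) (nxt, vis) novo).1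
      (expandNode (bfsAdj c) (nxt, vis) novo).2 fuel hsub'

theorem nu_drop (c : List (Int × Int)) (vis : PySem.Set Int) (t : List Int)
    (hnd : t.Nodup) (ht : ∀ z ∈ t, z ∈ ends c ∧ z ∉ vis) :
    nu c (vis ++ t) + t.length ≤ nu c vis := by
  unfold nu
  set l' := (ends c).filter (fun z => decide (z ∉ vis)) with hl'
  have hsplit : (ends c).filter (fun z => decide (z ∉ vis ++ t))
      = l'.filter (fun z => decide (z ∉ t)) := by
    rw [hl', List.filter_filter]
    apply List.filter_congr
    intro a _
    by_cases h1 : a ∈ t <;> by_cases h2 : a ∈ vis <;>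
      simp [h1, h2, List.mem_append]
  rw [hsplit]
  have hlen := List.length_eq_length_filter_add (l := l') (fun z => decide (z ∉ t))
  have htle : t.length ≤ (l'.filter (fun z => !decide (z ∉ t))).length := by
    have hsub : t.toFinset ⊆ (l'.filter (fun z => !decide (z ∉ t))).toFinset := by
      intro z hz
      rw [List.mem_toFinset] at *
      rw [List.mem_filter, hl', List.mem_filter]
      have := ht z hz
      simp [this.1, this.2, hz]
    calc t.length = t.toFinset.card := (List.toFinset_card_of_nodup hnd).symm
      _ ≤ (l'.filter (fun z => !decide (z ∉ t))).toFinset.card := Finset.card_le_card hsub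
      _ ≤ _ := List.toFinset_card_le _
  omega

theorem mainLemma (c : List (Int × Int)) (m : Int) :
    ∀ (fuelB : Nat) (frontier : List Int) (d : Int) (vis : PySem.Set Int) (fuelA : Nat),
    (∀ z ∈ frontier, z ∈ vis) →
    frontier.length + nu c vis ≤ fuelA → 1 + nu c vis ≤ fuelB →
    bfsLoopA c m fuelA (frontier.map (fun z => (z, d))) vis
      = levelLoopB (bfsAdj c) m fuelB d frontier vis := by
  intro fuelB
  induction fuelB with
  | zero => intro frontier d vis fuelA _ _ hB; omega
  | succ fuelB ih =>
    intro frontier d vis fuelA hsub hA hB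
    by_cases hf : frontier = []
    · subst hf; simp [bfsLoopA_nil, levelLoopB]
    · simp only [levelLoopB, if_neg hf]
      by_cases hd : d < m
      · simp only [if_pos hd]
        obtain ⟨t, heq, hnd, hm⟩ := expand_front_inv c frontier [] vis
        simp only [List.nil_append] at heq
        have hnu := nu_drop c vis t hnd hm
        have hAsplit : fuelA = frontier.length + (fuelA - frontier.length) := by omega
        rw [hAsplit]
        have hlev := levelA c m d hd frontier [] vis (fuelA - frontier.length) hsub
        simp only [List.map_nil, List.append_nil] at hlev
        rw [hlev, heq]
        by_cases ht : t = []
        · subst ht; simp [bfsLoopA_nil, levelLoopB_nil]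
        · have htlen : 1 ≤ t.length := by
            cases t with
            | nil => exact absurd rfl ht
            | cons a t => simp
          exact ih t (d + 1) (vis ++ t) (fuelA - frontier.length)
            (fun z hz => List.mem_append_right _ hz) (by omega) (by omega)
      · simp only [if_neg hd]
        have hAsplit : fuelA = frontier.length + (fuelA - frontier.length) := by omega
        rw [hAsplit, drainA c m d hd frontier _ vis]


-- ===== VERDICT (by name: the statement is the Claim_ definition above) =====
theorem bfs_spec : Claim_equal_bfs := by
  intro conexoes atual maximo _
  unfold Spec_bfs bfs bfs_alt
  have h := mainLemma conexoes maximo (2 * conexoes.length + 1) [atual] 0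
      (PySem.Set.ofList [atual]) (2 * conexoes.length + 1)
      (fun z hz => by rw [PySem.Set.mem_ofList]; exact hz) ?_ ?_
  · rw [show ([(atual, (0 : Int))]) = [atual].map (fun z => (z, (0 : Int))) from rfl, h]
  · have := List.length_filter_le (fun z => decide (z ∉ PySem.Set.ofList [atual])) (ends conexoes)
    have h2 := ends_length conexoes
    unfold nu; simp at *; omega
  · have := List.length_filter_le (fun z => decide (z ∉ PySem.Set.ofList [atual])) (ends conexoes)
    have h2 := ends_length conexoes
    unfold nu; simp at *; omega
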